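-- pv_equiv track=rewrite | github.com/AdamOtto/Daily-Challenges | Challenge828.py | numberOfHeaps
-- ===== SOURCE A (Python) =====
-- def choose(n, k, nck):
--     if (k > n):
--         return 0
--     if (n <= 1):
--         return 1
--     if (k == 0):
--         return 1
--
--     if (nck[n][k] != -1):
--         return nck[n][k]
--
--     answer = choose(n - 1, k - 1, nck) + choose(n - 1, k, nck)
--     nck[n][k] = answer
--     return answer
--
-- def numberOfHeaps(n, dp, log2, nck):
--     if (n <= 1):
--         return 1
--
--     if (dp[n] != -1):
--         return dp[n]
--
--     left = getLeft(n, log2)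
--     ans = (choose(n - 1, left, nck) * numberOfHeaps(left, dp, log2, nck)) * (numberOfHeaps(n - 1 - left, dp, log2, nck))
--     dp[n] = ans
--     return ans
--
-- def getLeft(n, log2):
--     if (n == 1):
--         return 0
--
--     h = log2[n]
--
--     # max number of elements that can be present in the
--     # hth level of any heap
--     numh = (1 << h) #(2 ^ h)
--
--     # number of elements that are actually present in
--     # last level(hth level)
--     # (2^h - 1)
--     last = n - ((1 << h) - 1)
--
--     # if more than half-filled
--     if (last >= (numh // 2)):
--         return (1 << h) - 1 # (2^h) - 1
--     else:
--         return (1 << h) - 1 - ((numh // 2) - last)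
-- ===== SOURCE B (Python) =====
-- def getLeft(n, log2):
--     if (n == 1):
--         return 0
--     h = log2[n]
--     numh = (1 << h)
--     last = n - ((1 << h) - 1)
--     if (last >= (numh // 2)):
--         return (1 << h) - 1
--     else:
--         return (1 << h) - 1 - ((numh // 2) - last)
--
-- def _prod(n, log2):
--     # product of all subtree sizes of the n-node heap shape
--     if n <= 1:
--         return 1
--     left = getLeft(n, log2)
--     return n * _prod(left, log2) * _prod(n - 1 - left, log2)
--
-- def numberOfHeaps(n, dp, log2, nck):
--     if n <= 1:
--         return 1
--     if dp[n] != -1: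
--         return dp[n]
--     fact = 1
--     for i in range(2, n + 1):
--         fact *= i
--     return fact // _prod(n, log2)
-- ===== Notes on version B (the rewrite author's own statement) =====
-- stated objective: simpler
-- what changed: Replaces the memoized binomial-convolution recurrence (Pascal-triangle choose table plus dp table, both mutated in place) with the closed-form hook-length style formula H(n) = n! // prod(n), where prod(n) is the product of all subtree sizes computed by one plain recursion; B mutates nothing (return-value equivalence only).
import Mathlib
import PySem

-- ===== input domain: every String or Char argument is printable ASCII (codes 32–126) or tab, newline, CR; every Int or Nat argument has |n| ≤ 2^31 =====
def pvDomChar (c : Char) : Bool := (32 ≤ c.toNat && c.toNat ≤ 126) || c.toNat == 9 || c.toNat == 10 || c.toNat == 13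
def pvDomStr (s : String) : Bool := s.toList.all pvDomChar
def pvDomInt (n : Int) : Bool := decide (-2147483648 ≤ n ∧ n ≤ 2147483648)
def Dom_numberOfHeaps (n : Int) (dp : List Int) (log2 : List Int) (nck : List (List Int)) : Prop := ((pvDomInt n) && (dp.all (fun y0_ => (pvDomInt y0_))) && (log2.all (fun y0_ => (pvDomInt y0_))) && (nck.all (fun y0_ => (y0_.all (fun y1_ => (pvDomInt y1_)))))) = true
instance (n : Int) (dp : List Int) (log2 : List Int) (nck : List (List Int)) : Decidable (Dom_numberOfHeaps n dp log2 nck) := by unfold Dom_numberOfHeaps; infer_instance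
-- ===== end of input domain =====

-- B replaces A's memoized binomial-convolution recurrence with the closed form n! // prod(n)
-- (prod(n) = product of all subtree sizes); equivalence is about the RETURN value only
-- (A fills dp/nck in place, B mutates nothing).


-- ===== PORT A =====
-- getLeft: a module helper both Pythons share verbatim.  none = Python exception
-- (IndexError on log2[n], or ValueError from '1 << h' with negative h).
def getLeftP (n : Int) (log2 : List Int) : Option Int :=
  if n = 1 then some 0
  else
    match PySem.List.pyGet? log2 n with
    | none => none
    | some h =>
      if h < 0 then none        -- Python: 1 << h raises ValueError for h < 0
      else
        let numh : Int := 2 ^ h.toNat          -- 1 << h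
        let last : Int := n - (2 ^ h.toNat - 1)
        if last ≥ PySem.Int.floordiv numh 2 then some (2 ^ h.toNat - 1)
        else some (2 ^ h.toNat - 1 - (PySem.Int.floordiv numh 2 - last))

-- choose(n, k, nck): nck threaded as state (Python mutates it in place); fuel makes the
-- recursion total (none = a Python exception; impossible under Pre_).
def chooseA : Nat → Int → Int → List (List Int) → Option (Int × List (List Int))
  | 0, _, _, _ => none
  | fuel + 1, n, k, nck =>
    if k > n then some (0, nck)
    else if n ≤ 1 then some (1, nck)
    else if k = 0 then some (1, nck)
    else
      match PySem.List.pyGet? nck n with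
      | none => none
      | some rowv =>
        match PySem.List.pyGet? rowv k with
        | none => none
        | some v =>
          if v ≠ -1 then some (v, nck)
          else
            match chooseA fuel (n - 1) (k - 1) nck with
            | none => none
            | some (a1, nck1) =>
              match chooseA fuel (n - 1) k nck1 with
              | none => none
              | some (a2, nck2) =>
                -- nck[n][k] = answer
                match PySem.List.pyGet? nck2 n with
                | none => none
                | some row2 =>
                  match PySem.List.pySet? row2 k (a1 + a2) with
                  | none => none
                  | some row2' =>
                    match PySem.List.pySet? nck2 n row2' with
                    | none => none
                    | some nck3 => some (a1 + a2, nck3)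

-- numberOfHeaps's recursion, with dp and nck threaded as state.
def heapsA : Nat → Int → List Int → List Int → List (List Int) → Option (Int × List Int × List (List Int))
  | 0, _, _, _, _ => none
  | fuel + 1, n, dp, log2, nck =>
    if n ≤ 1 then some (1, dp, nck)
    else
      match PySem.List.pyGet? dp n with
      | none => none
      | some v =>
        if v ≠ -1 then some (v, dp, nck)
        else
          match getLeftP n log2 with
          | none => none
          | some left =>
            match chooseA fuel (n - 1) left nck with
            | none => none
            | some (c, nck1) =>
              match heapsA fuel left dp log2 nck1 with
              | none => none
              | some (h1, dp1, nck2) =>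
                match heapsA fuel (n - 1 - left) dp1 log2 nck2 with
                | none => none
                | some (h2, dp2, nck3) =>
                  match PySem.List.pySet? dp2 n (c * h1 * h2) with
                  | none => none
                  | some dp3 => some (c * h1 * h2, dp3, nck3)

def numberOfHeaps (n : Int) (dp : List Int) (log2 : List Int) (nck : List (List Int)) : Int :=
  match heapsA (n.toNat + 1) n dp log2 nck with
  | some (v, _, _) => v
  | none => 0        -- a Python exception / fuel exhaustion: unreachable under Pre_

-- ===== PORT B =====
-- _prod(n, log2): product of all subtree sizes; plain recursion, fuel for totality.
def prodB : Nat → Int → List Int → Option Int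
  | 0, _, _ => none
  | fuel + 1, n, log2 =>
    if n ≤ 1 then some 1
    else
      match getLeftP n log2 with
      | none => none
      | some left =>
        match prodB fuel left log2 with
        | none => none
        | some p1 =>
          match prodB fuel (n - 1 - left) log2 with
          | none => none
          | some p2 => some (n * p1 * p2)

def numberOfHeaps_alt (n : Int) (dp : List Int) (log2 : List Int) (nck : List (List Int)) : Int :=
  if n ≤ 1 then 1
  else
    match PySem.List.pyGet? dp n with
    | none => 0      -- IndexError, unreachable under Pre_
    | some v =>
      if v ≠ -1 then v
      else
        match prodB (n.toNat + 1) n log2 with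
        | none => 0  -- unreachable under Pre_
        | some p => PySem.Int.floordiv ((PySem.List.pyRange 2 (n + 1) 1).foldl (· * ·) 1) p

-- ===== PRECONDITION & SPEC =====
-- row i of the nck table (readability helper for Pre_)
def pvRow (nck : List (List Int)) (i : Nat) : List Int := nck[i]?.getD []

-- Pre_ excludes (a) calls that raise (IndexError on dp[n]/log2[n]/nck[i][k], ValueError on a
-- negative shift, unbounded recursion on a corrupt log2 table) and (b) calls with dp[n] unset
-- but stale or wrong helper tables (dp/log2/nck within the range the recursion touches not in
-- their initialized state log2[i] = floor(log2 i), dp[i] = nck[i][k] = -1), on which A's value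
-- is an artefact of the garbage table contents, not a heap count.
def Pre_numberOfHeaps (n : Int) (dp : List Int) (log2 : List Int) (nck : List (List Int)) : Prop :=
  n ≤ 1 ∨
  (2 ≤ n ∧ n < (dp.length : Int) ∧
    (dp[n.toNat]? ≠ some (-1) ∨
      (n < (log2.length : Int) ∧ n ≤ (nck.length : Int) ∧
        (∀ i ∈ List.range (n.toNat + 1), 2 ≤ i →
          dp[i]? = some (-1) ∧ log2[i]? = some ((Nat.log 2 i : Nat) : Int)) ∧
        (∀ i ∈ List.range n.toNat, 2 ≤ i →
          i < (pvRow nck i).length ∧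
            ∀ k ∈ List.range (i + 1), 1 ≤ k → (pvRow nck i)[k]? = some (-1)))))

instance (n : Int) (dp : List Int) (log2 : List Int) (nck : List (List Int)) : Decidable (Pre_numberOfHeaps n dp log2 nck) := by unfold Pre_numberOfHeaps; infer_instance

def pvWitness_numberOfHeaps : Int × List Int × List Int × List (List Int) :=
  (3, [-1, -1, -1, -1], [0, 0, 1, 1], [[-1, -1, -1], [-1, -1, -1], [-1, -1, -1]])

def Spec_numberOfHeaps (n : Int) (dp : List Int) (log2 : List Int) (nck : List (List Int)) (out : Int) : Prop := out = numberOfHeaps_alt n dp log2 nck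
instance (n : Int) (dp : List Int) (log2 : List Int) (nck : List (List Int)) (out : Int) : Decidable (Spec_numberOfHeaps n dp log2 nck out) := by unfold Spec_numberOfHeaps; infer_instance

-- ===== CLAIM (what is proved, stated in full; the proofs are below) =====
def Claim_equal_numberOfHeaps : Prop := ∀ (n : Int) (dp : List Int) (log2 : List Int) (nck : List (List Int)), Dom_numberOfHeaps n dp log2 nck → Pre_numberOfHeaps n dp log2 nck → Spec_numberOfHeaps n dp log2 nck (numberOfHeaps n dp log2 nck)

-- ===== LEMMAS AND PROOFS =====

-- left-subtree size of a heap on s nodes (pure form of getLeft on a correct log2 table)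
def Lnat (s : Nat) : Nat :=
  if 2 ^ Nat.log 2 s / 2 ≤ s - (2 ^ Nat.log 2 s - 1) then 2 ^ Nat.log 2 s - 1
  else 2 ^ Nat.log 2 s - 1 - (2 ^ Nat.log 2 s / 2 - (s - (2 ^ Nat.log 2 s - 1)))

theorem Lnat_le (s : Nat) (hs : 2 ≤ s) : Lnat s ≤ s - 1 := by
  have hle : 2 ^ Nat.log 2 s ≤ s := Nat.pow_log_le_self 2 (by omega)
  have hlt : s < 2 ^ (Nat.log 2 s + 1) := Nat.lt_pow_succ_log_self (by norm_num) s
  have hlog : 0 < Nat.log 2 s := Nat.log_pos (by norm_num) hs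
  have hM : 2 ^ Nat.log 2 s = 2 * 2 ^ (Nat.log 2 s - 1) := by
    conv_lhs => rw [show Nat.log 2 s = (Nat.log 2 s - 1) + 1 from by omega]
    ring
  have hpow : 2 ^ (Nat.log 2 s + 1) = 2 * 2 ^ Nat.log 2 s := by ring
  rw [hpow, hM] at hlt
  rw [hM] at hle
  unfold Lnat
  rw [hM]
  split_ifs <;> omega

theorem Lnat_lt (s : Nat) (hs : 2 ≤ s) : Lnat s < s := by
  have := Lnat_le s hs; omega

-- pure heap count
def Hnat : Nat → Nat
  | s =>
    if hs : s ≤ 1 then 1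
    else (s - 1).choose (Lnat s) * Hnat (Lnat s) * Hnat (s - 1 - Lnat s)
termination_by s => s
decreasing_by
  · exact Lnat_lt s (by omega)
  · have := Lnat_lt s (by omega); omega

-- pure product of subtree sizes
def Pnat : Nat → Nat
  | s =>
    if hs : s ≤ 1 then 1
    else s * Pnat (Lnat s) * Pnat (s - 1 - Lnat s)
termination_by s => s
decreasing_by
  · exact Lnat_lt s (by omega)
  · have := Lnat_lt s (by omega); omega

theorem Pnat_pos (s : Nat) : 0 < Pnat s := by
  induction s using Nat.strong_induction_on with
  | _ s ih =>
    rw [Pnat]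
    split_ifs with h
    · exact one_pos
    · have h1 : Lnat s < s := Lnat_lt s (by omega)
      exact Nat.mul_pos (Nat.mul_pos (by omega) (ih _ h1)) (ih _ (by omega))

theorem Hnat_mul_Pnat (s : Nat) : Hnat s * Pnat s = s.factorial := by
  induction s using Nat.strong_induction_on with
  | _ s ih =>
    rw [Hnat, Pnat]
    split_ifs with h
    · have h01 : s = 0 ∨ s = 1 := by omega
      rcases h01 with rfl | rfl
      all_goals decide
    · have h2 : 2 ≤ s := by omega
      have hL : Lnat s ≤ s - 1 := Lnat_le s h2
      have h1 : Lnat s < s := by omega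
      have hr : s - 1 - Lnat s < s := by omega
      have key : (s - 1).choose (Lnat s) * (Lnat s).factorial * (s - 1 - Lnat s).factorial
          = (s - 1).factorial := Nat.choose_mul_factorial_mul_factorial hL
      have e1 := ih _ h1
      have e2 := ih _ hr
      have hfac : s * (s - 1).factorial = s.factorial := Nat.mul_factorial_pred (by omega)
      calc (s - 1).choose (Lnat s) * Hnat (Lnat s) * Hnat (s - 1 - Lnat s) *
            (s * Pnat (Lnat s) * Pnat (s - 1 - Lnat s))
          = s * ((s - 1).choose (Lnat s) * (Hnat (Lnat s) * Pnat (Lnat s)) *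
              (Hnat (s - 1 - Lnat s) * Pnat (s - 1 - Lnat s))) := by ring
        _ = s * ((s - 1).choose (Lnat s) * (Lnat s).factorial * (s - 1 - Lnat s).factorial) := by
              rw [e1, e2]
        _ = s * (s - 1).factorial := by rw [key]
        _ = s.factorial := hfac

-- getLeft on a correct log2 table computes Lnat
theorem getLeftP_eq (log2 : List Int) (N : Nat)
    (hlog : ∀ i : Nat, i ≤ N → 2 ≤ i → log2[i]? = some ((Nat.log 2 i : Nat) : Int))
    (m : Nat) (h2 : 2 ≤ m) (hm : m ≤ N) :
    getLeftP (m : Int) log2 = some ((Lnat m : Nat) : Int) := by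
  have hle : 2 ^ Nat.log 2 m ≤ m := Nat.pow_log_le_self 2 (by omega)
  have hlt : m < 2 ^ (Nat.log 2 m + 1) := Nat.lt_pow_succ_log_self (by norm_num) m
  have hlogpos : 0 < Nat.log 2 m := Nat.log_pos (by norm_num) h2
  have hM : 2 ^ Nat.log 2 m = 2 * 2 ^ (Nat.log 2 m - 1) := by
    conv_lhs => rw [show Nat.log 2 m = (Nat.log 2 m - 1) + 1 from by omega]
    ring
  have hpow : 2 ^ (Nat.log 2 m + 1) = 2 * 2 ^ Nat.log 2 m := by ring
  rw [hpow, hM] at hlt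
  rw [hM] at hle
  unfold getLeftP
  rw [if_neg (by omega : ¬ (m : Int) = 1)]
  rw [PySem.List.pyGet?_natCast, hlog m hm h2]
  dsimp only
  rw [if_neg (by omega : ¬ ((Nat.log 2 m : Nat) : Int) < 0)]
  simp only [Int.toNat_natCast]
  have hcast : ((2 : Int) ^ Nat.log 2 m) = ((2 ^ Nat.log 2 m : Nat) : Int) := by push_cast; ring
  rw [hcast]
  have hfd : PySem.Int.floordiv (((2 ^ Nat.log 2 m : Nat) : Int)) 2
      = ((2 ^ Nat.log 2 m / 2 : Nat) : Int) := by
    exact_mod_cast PySem.Int.floordiv_natCast (2 ^ Nat.log 2 m) 2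
  rw [hfd]
  unfold Lnat
  rw [hM]
  have hdiv : 2 * 2 ^ (Nat.log 2 m - 1) / 2 = 2 ^ (Nat.log 2 m - 1) := by omega
  rw [hdiv]
  split_ifs <;> simp only [Option.some.injEq] <;> omega

-- memo-table invariant for nck: every entry is untouched or the correct binomial
def NckInv (N : Nat) (nck0 nck : List (List Int)) : Prop :=
  nck.length = nck0.length ∧
  (∀ i : Nat, (pvRow nck i).length = (pvRow nck0 i).length) ∧
  (∀ i k : Nat, (pvRow nck i)[k]? = (pvRow nck0 i)[k]? ∨
     (2 ≤ i ∧ i + 1 ≤ N ∧ 1 ≤ k ∧ k ≤ i ∧ (pvRow nck i)[k]? = some ((i.choose k : Nat) : Int)))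

-- memo-table invariant for dp
def DpInv (N : Nat) (dp0 dp : List Int) : Prop :=
  dp.length = dp0.length ∧
  (∀ i : Nat, dp[i]? = dp0[i]? ∨ (2 ≤ i ∧ i ≤ N ∧ dp[i]? = some ((Hnat i : Nat) : Int)))

theorem choose_ok (N : Nat) (nck0 : List (List Int))
    (hlen0 : N ≤ nck0.length)
    (hfresh : ∀ i : Nat, i + 1 ≤ N → 2 ≤ i → i < (pvRow nck0 i).length ∧
        ∀ k : Nat, k ≤ i → 1 ≤ k → (pvRow nck0 i)[k]? = some (-1)) :
    ∀ (fuel n' : Nat) (k : Int) (nck : List (List Int)),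
      NckInv N nck0 nck → n' + 1 ≤ N → 0 ≤ k → n' + 1 ≤ fuel →
      ∃ nck', chooseA fuel (n' : Int) k nck = some ((n'.choose k.toNat : Int), nck') ∧
        NckInv N nck0 nck' := by
  intro fuel
  induction fuel with
  | zero => intro n' k nck _ _ _ hf; exact absurd hf (by omega)
  | succ fuel ih =>
    intro n' k nck hinv hn' hk hf
    obtain ⟨kt, rfl⟩ : ∃ kt : Nat, k = (kt : Int) := ⟨k.toNat, (Int.toNat_of_nonneg hk).symm⟩
    simp only [Int.toNat_natCast]
    by_cases hkgt : ((kt : Nat) : Int) > (n' : Int)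
    · refine ⟨nck, ?_, hinv⟩
      rw [chooseA, if_pos hkgt, Nat.choose_eq_zero_of_lt (by omega)]
      norm_num
    · by_cases hn1 : (n' : Int) ≤ 1
      · refine ⟨nck, ?_, hinv⟩
        have hch : n'.choose kt = 1 := by
          rcases Nat.lt_or_ge kt 1 with h | h
          · have : kt = 0 := by omega
            rw [this, Nat.choose_zero_right]
          · have hk1 : kt = 1 := by omega
            have hn'1 : n' = 1 := by omega
            rw [hk1, hn'1]
            decide
        rw [chooseA, if_neg hkgt, if_pos hn1, hch]
        norm_num
      · by_cases hk0 : ((kt : Nat) : Int) = 0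
        · refine ⟨nck, ?_, hinv⟩
          have hkt0 : kt = 0 := by omega
          rw [chooseA, if_neg hkgt, if_neg hn1, if_pos hk0, hkt0, Nat.choose_zero_right]
          norm_num
        · -- main branch: n' ≥ 2, 1 ≤ kt ≤ n'
          have hn2 : 2 ≤ n' := by omega
          have hk1 : 1 ≤ kt := by omega
          have hkn : kt ≤ n' := by omega
          obtain ⟨hlenEq, hrowlen, hent⟩ := hinv
          have hrow0 := hfresh n' hn' hn2
          have hrlen : kt < (pvRow nck n').length := by rw [hrowlen]; omega
          have hnlen : n' < nck.length := by omega
          have hg1 : PySem.List.pyGet? nck ((n' : Nat) : Int) = some (pvRow nck n') := by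
            simp [pvRow, List.getElem?_eq_getElem hnlen]
          have hg2 : PySem.List.pyGet? (pvRow nck n') ((kt : Nat) : Int)
              = some ((pvRow nck n')[kt]) := by
            rw [PySem.List.pyGet?_natCast, List.getElem?_eq_getElem hrlen]
          rcases hent n' kt with hsame | hval
          · -- entry is fresh: -1; compute, memoize
            have hvv : (pvRow nck n')[kt] = -1 := by
              have h' : (pvRow nck n')[kt]? = some (-1) := by
                rw [hsame]; exact hrow0.2 kt hkn hk1
              rw [List.getElem?_eq_getElem hrlen] at h'
              exact Option.some.inj h'
            obtain ⟨nck1, he1, hinv1⟩ :=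
              ih (n' - 1) ((kt : Int) - 1) nck ⟨hlenEq, hrowlen, hent⟩ (by omega) (by omega) (by omega)
            obtain ⟨nck2, he2, hinv2⟩ :=
              ih (n' - 1) (kt : Int) nck1 hinv1 (by omega) (by omega) (by omega)
            have hkt1 : ((kt : Int) - 1).toNat = kt - 1 := by omega
            rw [hkt1] at he1
            rw [Int.toNat_natCast] at he2
            obtain ⟨hlen2, hrowlen2, hent2⟩ := hinv2
            have hnlen2 : n' < nck2.length := by omega
            have hrlen2 : kt < (pvRow nck2 n').length := by rw [hrowlen2]; omega
            have hg3 : PySem.List.pyGet? nck2 ((n' : Nat) : Int) = some (pvRow nck2 n') := by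
              simp [pvRow, List.getElem?_eq_getElem hnlen2]
            have hpascal : (n' - 1).choose (kt - 1) + (n' - 1).choose kt = n'.choose kt := by
              have e1 : n' = (n' - 1) + 1 := by omega
              have e2 : kt = (kt - 1) + 1 := by omega
              calc (n' - 1).choose (kt - 1) + (n' - 1).choose kt
                  = (n' - 1).choose (kt - 1) + (n' - 1).choose ((kt - 1) + 1) := by rw [← e2]
                _ = ((n' - 1) + 1).choose ((kt - 1) + 1) := (Nat.choose_succ_succ _ _).symm
                _ = n'.choose kt := by rw [← e1, ← e2]
            have hsum : (((n' - 1).choose (kt - 1) : Nat) : Int) + (((n' - 1).choose kt : Nat) : Int)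
                = ((n'.choose kt : Nat) : Int) := by rw [← hpascal]; push_cast; ring
            have hs1 : PySem.List.pySet? (pvRow nck2 n') ((kt : Nat) : Int)
                ((n'.choose kt : Nat) : Int)
                = some ((pvRow nck2 n').set kt ((n'.choose kt : Nat) : Int)) :=
              PySem.List.pySet?_natCast _ _ _ hrlen2
            have hs2 : PySem.List.pySet? nck2 ((n' : Nat) : Int)
                ((pvRow nck2 n').set kt ((n'.choose kt : Nat) : Int))
                = some (nck2.set n' ((pvRow nck2 n').set kt ((n'.choose kt : Nat) : Int))) :=
              PySem.List.pySet?_natCast _ _ _ hnlen2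
            have harg : (n' : Int) - 1 = ((n' - 1 : Nat) : Int) := by omega
            refine ⟨nck2.set n' ((pvRow nck2 n').set kt ((n'.choose kt : Nat) : Int)), ?_, ?_⟩
            · rw [chooseA, if_neg hkgt, if_neg hn1, if_neg hk0, hg1]
              dsimp only
              rw [hg2]
              dsimp only
              rw [hvv]
              rw [if_neg (by norm_num : ¬ ((-1 : Int) ≠ -1))]
              rw [harg, he1]
              dsimp only
              rw [he2]
              dsimp only
              rw [hsum, hg3]
              dsimp only
              rw [hs1]
              dsimp only
              rw [hs2]
            · -- invariant preserved
              refine ⟨by rw [List.length_set]; exact hlen2, ?_, ?_⟩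
              · intro i
                by_cases hi : n' = i
                · subst hi
                  have hrw : pvRow (nck2.set n' ((pvRow nck2 n').set kt ((n'.choose kt : Nat) : Int))) n'
                      = (pvRow nck2 n').set kt ((n'.choose kt : Nat) : Int) := by
                    simp [pvRow, List.getElem?_set, hnlen2]
                  rw [hrw, List.length_set]
                  exact hrowlen2 n'
                · have hrw : pvRow (nck2.set n' ((pvRow nck2 n').set kt ((n'.choose kt : Nat) : Int))) i
                      = pvRow nck2 i := by
                    simp [pvRow, List.getElem?_set, hi]
                  rw [hrw]
                  exact hrowlen2 i
              · intro i k'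
                by_cases hi : n' = i
                · subst hi
                  have hrw : pvRow (nck2.set n' ((pvRow nck2 n').set kt ((n'.choose kt : Nat) : Int))) n'
                      = (pvRow nck2 n').set kt ((n'.choose kt : Nat) : Int) := by
                    simp [pvRow, List.getElem?_set, hnlen2]
                  rw [hrw]
                  by_cases hkk : kt = k'
                  · subst hkk
                    right
                    refine ⟨hn2, hn', hk1, hkn, ?_⟩
                    rw [List.getElem?_set, if_pos rfl, if_pos hrlen2]
                  · rw [List.getElem?_set, if_neg hkk]
                    exact hent2 n' k'
                · have hrw : pvRow (nck2.set n' ((pvRow nck2 n').set kt ((n'.choose kt : Nat) : Int))) i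
                      = pvRow nck2 i := by
                    simp [pvRow, List.getElem?_set, hi]
                  rw [hrw]
                  exact hent2 i k'
          · -- entry already memoized
            obtain ⟨_, _, _, _, hveq⟩ := hval
            have hvv : (pvRow nck n')[kt] = ((n'.choose kt : Nat) : Int) := by
              rw [List.getElem?_eq_getElem hrlen] at hveq
              exact Option.some.inj hveq
            refine ⟨nck, ?_, ⟨hlenEq, hrowlen, hent⟩⟩
            rw [chooseA, if_neg hkgt, if_neg hn1, if_neg hk0, hg1]
            dsimp only
            rw [hg2]
            dsimp only
            rw [hvv]
            rw [if_pos (by have := Int.natCast_nonneg (n'.choose kt); omega :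
              ((n'.choose kt : Nat) : Int) ≠ -1)]

theorem heaps_ok (N : Nat) (dp0 log2 : List Int) (nck0 : List (List Int))
    (hN2 : 2 ≤ N) (hdplen : N < dp0.length)
    (hncklen : N ≤ nck0.length)
    (hdp0 : ∀ i : Nat, i ≤ N → 2 ≤ i → dp0[i]? = some (-1))
    (hlog : ∀ i : Nat, i ≤ N → 2 ≤ i → log2[i]? = some ((Nat.log 2 i : Nat) : Int))
    (hfresh : ∀ i : Nat, i + 1 ≤ N → 2 ≤ i → i < (pvRow nck0 i).length ∧
        ∀ k : Nat, k ≤ i → 1 ≤ k → (pvRow nck0 i)[k]? = some (-1)) :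
    ∀ (fuel m : Nat) (dp : List Int) (nck : List (List Int)),
      DpInv N dp0 dp → NckInv N nck0 nck → m ≤ N → m + 1 ≤ fuel →
      ∃ dp' nck', heapsA fuel (m : Int) dp log2 nck
          = some (((Hnat m : Nat) : Int), dp', nck') ∧ DpInv N dp0 dp' ∧ NckInv N nck0 nck' := by
  intro fuel
  induction fuel with
  | zero => intro m dp nck _ _ _ hf; exact absurd hf (by omega)
  | succ fuel ih =>
    intro m dp nck hdpinv hinv hm hf
    by_cases hm1 : (m : Int) ≤ 1
    · refine ⟨dp, nck, ?_, hdpinv, hinv⟩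
      have h1 : ((Hnat m : Nat) : Int) = 1 := by
        rw [Hnat, dif_pos (by omega : m ≤ 1)]; norm_num
      rw [heapsA, if_pos hm1, h1]
    · have hm2 : 2 ≤ m := by omega
      obtain ⟨hdlen, hdent⟩ := hdpinv
      have hmlen : m < dp.length := by omega
      have hgd : PySem.List.pyGet? dp ((m : Nat) : Int) = some dp[m] := by
        rw [PySem.List.pyGet?_natCast, List.getElem?_eq_getElem hmlen]
      rcases hdent m with hsame | hval
      · -- dp[m] fresh: -1, so compute
        have hvv : dp[m] = -1 := by
          have h' : dp[m]? = some (-1) := by rw [hsame]; exact hdp0 m hm hm2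
          rw [List.getElem?_eq_getElem hmlen] at h'
          exact Option.some.inj h'
        have hL := Lnat_le m hm2
        have hLlt : Lnat m < m := by omega
        obtain ⟨nck1, hec, hinv1⟩ := choose_ok N nck0 hncklen hfresh fuel (m - 1)
          ((Lnat m : Nat) : Int) nck hinv (by omega) (by omega) (by omega)
        obtain ⟨dp1, nck2, he1, hdpinv1, hinv2⟩ :=
          ih (Lnat m) dp nck1 ⟨hdlen, hdent⟩ hinv1 (by omega) (by omega)
        obtain ⟨dp2, nck3, he2, hdpinv2, hinv3⟩ :=
          ih (m - 1 - Lnat m) dp1 nck2 hdpinv1 hinv2 (by omega) (by omega)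
        obtain ⟨hdlen2, hdent2⟩ := hdpinv2
        have hmlen2 : m < dp2.length := by omega
        rw [Int.toNat_natCast] at hec
        have harg1 : ((m : Nat) : Int) - 1 = ((m - 1 : Nat) : Int) := by omega
        have harg2 : ((m - 1 : Nat) : Int) - ((Lnat m : Nat) : Int)
            = ((m - 1 - Lnat m : Nat) : Int) := by omega
        have hH : (((m - 1).choose (Lnat m) : Nat) : Int) * ((Hnat (Lnat m) : Nat) : Int)
            * ((Hnat (m - 1 - Lnat m) : Nat) : Int) = ((Hnat m : Nat) : Int) := by
          conv_rhs => rw [Hnat]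
          rw [dif_neg (by omega : ¬ m ≤ 1)]
          push_cast
          ring
        have hset : PySem.List.pySet? dp2 ((m : Nat) : Int) ((Hnat m : Nat) : Int)
            = some (dp2.set m ((Hnat m : Nat) : Int)) := PySem.List.pySet?_natCast _ _ _ hmlen2
        refine ⟨dp2.set m ((Hnat m : Nat) : Int), nck3, ?_, ?_, hinv3⟩
        · rw [heapsA, if_neg hm1, hgd]
          dsimp only
          rw [hvv]
          rw [if_neg (by norm_num : ¬ ((-1 : Int) ≠ -1))]
          rw [getLeftP_eq log2 N hlog m hm2 hm]
          dsimp only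
          rw [harg1, hec]
          dsimp only
          rw [he1]
          dsimp only
          rw [harg2, he2]
          dsimp only
          rw [hH, hset]
        · refine ⟨by rw [List.length_set]; exact hdlen2, fun i => ?_⟩
          by_cases hi : m = i
          · subst hi
            right
            exact ⟨hm2, hm, by rw [List.getElem?_set, if_pos rfl, if_pos hmlen2]⟩
          · rw [List.getElem?_set, if_neg hi]
            exact hdent2 i
      · -- dp[m] already memoized
        obtain ⟨_, _, hveq⟩ := hval
        have hvv : dp[m] = ((Hnat m : Nat) : Int) := by
          rw [List.getElem?_eq_getElem hmlen] at hveq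
          exact Option.some.inj hveq
        refine ⟨dp, nck, ?_, ⟨hdlen, hdent⟩, hinv⟩
        rw [heapsA, if_neg hm1, hgd]
        dsimp only
        rw [hvv]
        rw [if_pos (by have := Int.natCast_nonneg (Hnat m); omega :
          ((Hnat m : Nat) : Int) ≠ -1)]

-- the factorial loop of B
theorem fact_loop : ∀ m : Nat, 1 ≤ m →
    (PySem.List.pyRange 2 ((m : Int) + 1) 1).foldl (· * ·) 1 = ((m.factorial : Nat) : Int) := by
  intro m hm
  induction m, hm using Nat.le_induction with
  | base =>
    rw [show ((1 : Nat) : Int) + 1 = 2 from by norm_num,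
      PySem.List.pyRange_one_eq_nil (le_refl 2)]
    simp [Nat.factorial]
  | succ m hm ih =>
    have hcast : ((m + 1 : Nat) : Int) + 1 = ((m : Int) + 1) + 1 := by push_cast; ring
    rw [hcast, PySem.List.pyRange_one_succ_right (by omega : (2 : Int) ≤ (m : Int) + 1)]
    rw [List.foldl_append, ih]
    simp only [List.foldl_cons, List.foldl_nil]
    push_cast [Nat.factorial_succ]
    ring

-- B's recursion computes Pnat
theorem prod_ok (N : Nat) (log2 : List Int)
    (hlog : ∀ i : Nat, i ≤ N → 2 ≤ i → log2[i]? = some ((Nat.log 2 i : Nat) : Int)) :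
    ∀ (fuel m : Nat), m ≤ N → m + 1 ≤ fuel →
      prodB fuel (m : Int) log2 = some ((Pnat m : Nat) : Int) := by
  intro fuel
  induction fuel with
  | zero => intro m _ hf; exact absurd hf (by omega)
  | succ fuel ih =>
    intro m hm hf
    by_cases h1 : (m : Int) ≤ 1
    · have hp1 : ((Pnat m : Nat) : Int) = 1 := by
        rw [Pnat, dif_pos (by omega : m ≤ 1)]; norm_num
      rw [prodB, if_pos h1, hp1]
    · have hm2 : 2 ≤ m := by omega
      have hL := Lnat_le m hm2
      have harg : ((m : Nat) : Int) - 1 - ((Lnat m : Nat) : Int)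
          = ((m - 1 - Lnat m : Nat) : Int) := by omega
      rw [prodB, if_neg h1, getLeftP_eq log2 N hlog m hm2 hm]
      dsimp only
      rw [ih (Lnat m) (by omega) (by omega)]
      dsimp only
      rw [harg, ih (m - 1 - Lnat m) (by omega) (by omega)]
      dsimp only
      simp only [Option.some.injEq]
      conv_rhs => rw [Pnat]
      rw [dif_neg (by omega : ¬ m ≤ 1)]
      push_cast
      ring

-- ===== VERDICT (by name: the statement is the Claim_ definition above) =====
theorem numberOfHeaps_spec : Claim_equal_numberOfHeaps := by
  unfold Claim_equal_numberOfHeaps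
  intro n dp log2 nck _ hpre
  unfold Spec_numberOfHeaps numberOfHeaps numberOfHeaps_alt
  rcases hpre with hle | ⟨hn2, hdlen, hrest⟩
  · -- n ≤ 1
    rw [heapsA, if_pos hle, if_pos hle]
  · obtain ⟨N, rfl⟩ : ∃ N : Nat, n = ((N : Nat) : Int) :=
      ⟨n.toNat, (Int.toNat_of_nonneg (by omega)).symm⟩
    simp only [Int.toNat_natCast] at hrest ⊢
    have hnle : ¬ ((N : Nat) : Int) ≤ 1 := by omega
    have hN2 : 2 ≤ N := by omega
    have hmlen : N < dp.length := by omega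
    have hgd : PySem.List.pyGet? dp ((N : Nat) : Int) = some dp[N] := by
      rw [PySem.List.pyGet?_natCast, List.getElem?_eq_getElem hmlen]
    rcases hrest with hne | ⟨hllen, hncklen, hdl, hnck⟩
    · -- dp[n] already set to something ≠ -1: both return it
      have hvne : dp[N] ≠ -1 := by
        intro h
        exact hne (by rw [List.getElem?_eq_getElem hmlen, h])
      rw [heapsA, if_neg hnle, hgd]
      dsimp only
      rw [if_pos hvne, if_pos hvne, if_neg hnle]
    · -- fresh tables: A computes Hnat, B computes n!/Pnat = Hnat
      have hdp0 : ∀ i : Nat, i ≤ N → 2 ≤ i → dp[i]? = some (-1) :=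
        fun i h1 h2 => (hdl i (List.mem_range.mpr (by omega)) h2).1
      have hlogc : ∀ i : Nat, i ≤ N → 2 ≤ i →
          log2[i]? = some ((Nat.log 2 i : Nat) : Int) :=
        fun i h1 h2 => (hdl i (List.mem_range.mpr (by omega)) h2).2
      have hfresh : ∀ i : Nat, i + 1 ≤ N → 2 ≤ i → i < (pvRow nck i).length ∧
          ∀ k : Nat, k ≤ i → 1 ≤ k → (pvRow nck i)[k]? = some (-1) :=
        fun i h1 h2 =>
          ⟨(hnck i (List.mem_range.mpr (by omega)) h2).1,
           fun k hk hk1 =>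
             (hnck i (List.mem_range.mpr (by omega)) h2).2 k (List.mem_range.mpr (by omega)) hk1⟩
      obtain ⟨dp', nck', heq, _, _⟩ := heaps_ok N dp log2 nck hN2 hmlen (by omega)
        hdp0 hlogc hfresh (N + 1) N dp nck
        ⟨rfl, fun i => Or.inl rfl⟩ ⟨rfl, fun i => rfl, fun i k => Or.inl rfl⟩
        (le_refl _) (le_refl _)
      rw [heq]
      dsimp only
      -- B side
      have hgd1 : PySem.List.pyGet? dp ((N : Nat) : Int) = some (-1) := by
        rw [PySem.List.pyGet?_natCast]
        exact hdp0 N (le_refl _) hN2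
      rw [if_neg hnle, hgd1]
      dsimp only
      rw [if_neg (by norm_num : ¬ ((-1 : Int) ≠ -1))]
      rw [prod_ok N log2 hlogc (N + 1) N (le_refl _) (le_refl _)]
      dsimp only
      rw [fact_loop N (by omega)]
      rw [show PySem.Int.floordiv ((N.factorial : Nat) : Int) ((Pnat N : Nat) : Int)
          = ((N.factorial / Pnat N : Nat) : Int) from PySem.Int.floordiv_natCast _ _]
      rw [← Hnat_mul_Pnat N, Nat.mul_div_cancel _ (Pnat_pos N)]
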